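-- pv_equiv track=rewrite | github.com/ToomasST/dropXL | ___PRENTA TOODETE TÕLKIMINE/4_Samm_toodete_tolkimine.py | normalize_prefix
-- ===== SOURCE A (Python) =====
-- def normalize_prefix(raw: str) -> str:
--     raw = (raw or "").strip()
--     if not raw:
--         return ""
--     val = raw.rstrip("/")
--     val = val.replace(" > ", "/").replace(">", "/")
--     if not val.endswith("/"):
--         val += "/"
--     while "//" in val:
--         val = val.replace("//", "/")
--     return val
-- ===== SOURCE B (Python) =====
-- def normalize_prefix(raw: str) -> str:
--     raw = (raw or "").strip()
--     if not raw:
--         return ""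
--     val = raw.rstrip("/")
--     val = val.replace(" > ", "/").replace(">", "/")
--     out = []
--     for ch in val:
--         if ch == "/" and out and out[-1] == "/":
--             continue
--         out.append(ch)
--     if not out or out[-1] != "/":
--         out.append("/")
--     return "".join(out)
-- ===== Notes on version B (the rewrite author's own statement) =====
-- stated objective: alternative
-- what changed: The fixpoint loop `while '//' in val: val = val.replace('//','/')` (repeated whole-string scans until no double slash remains) is replaced by a single left-to-right pass that builds the output and skips a '/' whenever the previously emitted character is '/', with the trailing-slash guarantee moved after the pass.
import Mathlib
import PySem

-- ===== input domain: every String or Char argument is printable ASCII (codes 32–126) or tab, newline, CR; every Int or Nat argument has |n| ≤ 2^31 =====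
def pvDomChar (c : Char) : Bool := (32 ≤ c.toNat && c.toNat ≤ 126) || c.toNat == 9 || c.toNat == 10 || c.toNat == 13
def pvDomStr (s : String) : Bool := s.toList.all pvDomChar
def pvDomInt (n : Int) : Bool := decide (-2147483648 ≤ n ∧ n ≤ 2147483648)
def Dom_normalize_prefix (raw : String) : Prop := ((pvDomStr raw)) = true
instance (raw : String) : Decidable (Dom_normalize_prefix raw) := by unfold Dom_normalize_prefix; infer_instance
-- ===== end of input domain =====

-- B replaces A's `while '//' in val: val = val.replace('//','/')` fixpoint loop by a single
-- left-to-right pass that skips a '/' following an emitted '/'; same return value, no speed claim.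

-- ===== PORT A =====
-- shared helper: Python's  s.rstrip("/")  — drop the maximal run of '/' from the right (exact)
def pvRstripSlash (s : List Char) : List Char :=
  (s.reverse.dropWhile (· == '/')).reverse

-- one pass of Python's  s.replace("//", "/")  (left-to-right, non-overlapping); used to prove
-- termination of the while-loop port below (pvReplaceSlash_eq_rep2, pvRep2_shrink)
def pvRep2 : List Char → List Char
  | [] => []
  | [c] => [c]
  | c :: d :: t => if c = '/' ∧ d = '/' then '/' :: pvRep2 t else c :: pvRep2 (d :: t)

-- does s contain "//" ?  (closed recursive form of  '//' in s)
def pvHasDS : List Char → Bool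
  | [] => false
  | [_] => false
  | c :: d :: t => (c == '/' && d == '/') || pvHasDS (d :: t)

theorem pvRep2_length_le (s : List Char) : (pvRep2 s).length ≤ s.length := by
  induction s using pvRep2.induct with
  | case1 => simp [pvRep2]
  | case2 c => simp [pvRep2]
  | case3 c d t h ih => simp [pvRep2, h]; omega
  | case4 c d t h ih => simp [pvRep2, h]; simp at ih; omega

theorem pvReplaceGo_eq_rep2 (fuel : Nat) :
    ∀ (l acc : List Char), l.length ≤ fuel →
      PySem.Chars.replace.go ['/', '/'] ['/'] fuel l acc = acc.reverse ++ pvRep2 l := by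
  induction fuel with
  | zero => intro l acc h; have : l = [] := List.eq_nil_of_length_eq_zero (Nat.le_zero.mp h)
            subst this; simp [PySem.Chars.replace.go, pvRep2]
  | succ n ih =>
    intro l acc h
    match l with
    | [] => simp [PySem.Chars.replace.go, pvRep2]
    | [c] =>
      have hp : ['/', '/'].isPrefixOf [c] = false := by simp [List.isPrefixOf]
      simp only [PySem.Chars.replace.go, hp, Bool.false_eq_true, if_false]
      rw [ih [] (c :: acc) (by simp)]
      simp [pvRep2]
    | c :: d :: t =>
      by_cases hcd : c = '/' ∧ d = '/'
      · obtain ⟨rfl, rfl⟩ := hcd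
        have hp : ['/', '/'].isPrefixOf ('/' :: '/' :: t) = true := by simp [List.isPrefixOf]
        simp only [PySem.Chars.replace.go, hp, if_true]
        rw [show List.drop ['/', '/'].length ('/' :: '/' :: t) = t from rfl,
          ih t (['/'].reverse ++ acc) (by simp at h ⊢; omega)]
        simp [pvRep2]
      · have hp : ['/', '/'].isPrefixOf (c :: d :: t) = false := by
          simp [List.isPrefixOf]
          intro hc hd; exact hcd ⟨hc.symm, hd.symm⟩
        simp only [PySem.Chars.replace.go, hp, Bool.false_eq_true, if_false]
        rw [ih (d :: t) (c :: acc) (by simp at h ⊢; omega)]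
        simp [pvRep2, hcd]

theorem pvReplaceSlash_eq_rep2 (s : List Char) :
    PySem.Chars.replace s ['/', '/'] ['/'] = pvRep2 s := by
  rw [PySem.Chars.replace]
  simp only [List.isEmpty_cons, if_false, Bool.false_eq_true]
  simpa using pvReplaceGo_eq_rep2 s.length s [] (le_refl _)

theorem pvRep2_shrink (s : List Char) (h : pvHasDS s = true) :
    (pvRep2 s).length < s.length := by
  induction s using pvRep2.induct with
  | case1 => simp [pvHasDS] at h
  | case2 c => simp [pvHasDS] at h
  | case3 c d t hcd ih =>
    have := pvRep2_length_le t
    simp [pvRep2, hcd]; omega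
  | case4 c d t hcd ih =>
    have hds : pvHasDS (d :: t) = true := by
      simp [pvHasDS] at h
      rcases h with ⟨hc, hd⟩ | h
      · exact absurd ⟨hc, hd⟩ hcd
      · exact h
    have := ih hds
    simp at this
    simp [pvRep2, hcd]; omega

theorem pvHasDS_iff_infix (s : List Char) : pvHasDS s = true ↔ ['/', '/'] <:+: s := by
  induction s using pvRep2.induct with
  | case1 =>
    simp only [pvHasDS, false_iff, Bool.false_eq_true]
    rintro ⟨l, r, hlr⟩
    have := congrArg List.length hlr; simp at this
  | case2 c =>
    simp only [pvHasDS, false_iff, Bool.false_eq_true]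
    rintro ⟨l, r, hlr⟩
    have := congrArg List.length hlr; simp at this; omega
  | case3 c d t hcd ih =>
    obtain ⟨rfl, rfl⟩ := hcd
    simp only [pvHasDS, true_iff, beq_self_eq_true, Bool.and_self, Bool.true_or]
    exact ⟨[], t, rfl⟩
  | case4 c d t hcd ih =>
    constructor
    · intro h
      simp [pvHasDS] at h
      rcases h with ⟨hc, hd⟩ | h
      · exact absurd ⟨hc, hd⟩ hcd
      · obtain ⟨l, r, hlr⟩ := ih.mp h
        exact ⟨c :: l, r, by rw [List.cons_append, List.cons_append, hlr]⟩
    · rintro ⟨l, r, hlr⟩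
      match l, hlr with
      | [], hlr =>
        simp at hlr
        exact absurd ⟨hlr.1.symm, hlr.2.1.symm⟩ hcd
      | x :: l', hlr =>
        simp at hlr
        simp [pvHasDS]
        exact Or.inr (ih.mpr ⟨l', r, by simpa using hlr.2⟩)

-- the while-loop:  while "//" in val: val = val.replace("//", "/")
def pvNpLoop (s : List Char) : List Char :=
  if PySem.Chars.isIn ['/', '/'] s then
    pvNpLoop (PySem.Chars.replace s ['/', '/'] ['/'])
  else s
  termination_by s.length
  decreasing_by
    rename_i h
    rw [pvReplaceSlash_eq_rep2]
    exact pvRep2_shrink s ((pvHasDS_iff_infix s).mpr ((PySem.Chars.isIn_iff_infix _ _).mp h))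

def normalize_prefix (raw : String) : String :=
  let r := PySem.Chars.strip raw.toList          -- raw = (raw or "").strip()
  if r.isEmpty then "" else                       -- if not raw: return ""
  let v1 := pvRstripSlash r                       -- val = raw.rstrip("/")
  let v2 := PySem.Chars.replace (PySem.Chars.replace v1 [' ', '>', ' '] ['/']) ['>'] ['/']
  let v3 := if PySem.Chars.endswith v2 ['/'] then v2 else v2 ++ ['/']
  String.ofList (pvNpLoop v3)

-- ===== PORT B =====
def normalize_prefix_alt (raw : String) : String :=
  let r := PySem.Chars.strip raw.toList          -- raw = (raw or "").strip()
  if r.isEmpty then "" else                       -- if not raw: return ""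
  let v1 := pvRstripSlash r                       -- val = raw.rstrip("/")
  let v2 := PySem.Chars.replace (PySem.Chars.replace v1 [' ', '>', ' '] ['/']) ['>'] ['/']
  -- for ch in val: skip '/' when out is non-empty and out[-1] == '/'   (out[-1] = getLast?, exact)
  let out := v2.foldl
    (fun out ch => if ch == '/' && !out.isEmpty && out.getLast? == some '/' then out
                   else out ++ [ch]) []
  -- if not out or out[-1] != "/": out.append("/")
  let out := if out.getLast? == some '/' then out else out ++ ['/']
  String.ofList out

-- ===== PRECONDITION & SPEC =====
def Spec_normalize_prefix (raw : String) (out : String) : Prop := out = normalize_prefix_alt raw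
instance (raw : String) (out : String) : Decidable (Spec_normalize_prefix raw out) := by unfold Spec_normalize_prefix; infer_instance

-- ===== CLAIM (what is proved, stated in full; the proofs are below) =====
def Claim_equal_normalize_prefix : Prop := ∀ (raw : String), Dom_normalize_prefix raw → Spec_normalize_prefix raw (normalize_prefix raw)

-- ===== LEMMAS AND PROOFS =====

-- collapse runs of '/' to one; the flag says "the previously emitted char was '/'"
def pvCol : Bool → List Char → List Char
  | _, [] => []
  | f, c :: t => if c == '/' then (if f then pvCol true t else '/' :: pvCol true t)
                 else c :: pvCol false t

theorem pvCol_rep2 (s : List Char) : ∀ f, pvCol f (pvRep2 s) = pvCol f s := by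
  induction s using pvRep2.induct with
  | case1 => intro f; simp [pvRep2]
  | case2 c => intro f; simp [pvRep2]
  | case3 c d t hcd ih =>
    obtain ⟨rfl, rfl⟩ := hcd
    intro f; cases f <;> simp [pvRep2, pvCol, ih]
  | case4 c d t hcd ih =>
    intro f
    have hr : pvRep2 (c :: d :: t) = c :: pvRep2 (d :: t) := by
      rw [pvRep2.eq_def]; simp [hcd]
    rw [hr]
    by_cases hc : c = '/' <;> cases f <;> simp [pvCol, hc, ih]

theorem pvCol_of_noDS (s : List Char) (h : pvHasDS s = false) :
    ∀ f, (f = true → s.head? ≠ some '/') → pvCol f s = s := by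
  induction s using pvRep2.induct with
  | case1 => intro f _; simp [pvCol]
  | case2 c =>
    intro f hf
    cases f with
    | false => by_cases hc : c = '/' <;> simp [pvCol, hc]
    | true =>
      have hc : c ≠ '/' := by
        intro hc; exact (hf rfl) (by simp [hc])
      simp [pvCol, hc]
  | case3 c d t hcd ih =>
    obtain ⟨rfl, rfl⟩ := hcd
    simp [pvHasDS] at h
  | case4 c d t hcd ih =>
    intro f hf
    have hds : pvHasDS (d :: t) = false := by
      simp [pvHasDS] at h; exact h.2
    by_cases hc : c = '/'
    · subst hc
      have hd : d ≠ '/' := by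
        intro hd; exact hcd ⟨rfl, hd⟩
      cases f with
      | true => exact (hf rfl rfl).elim
      | false =>
        have h1 := ih hds true (fun _ => by simp [hd])
        calc pvCol false ('/' :: d :: t) = '/' :: pvCol true (d :: t) := by simp [pvCol]
          _ = '/' :: d :: t := by rw [h1]
    · have h1 := ih hds false (by simp)
      rw [show pvCol f (c :: d :: t) = c :: pvCol false (d :: t) from by
        cases f <;> simp [pvCol, hc], h1]

theorem pvNpLoop_eq_col (s : List Char) : pvNpLoop s = pvCol false s := by
  rw [pvNpLoop]
  split
  · rename_i h
    rw [pvNpLoop_eq_col, pvReplaceSlash_eq_rep2, pvCol_rep2]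
  · rename_i h
    have hds : pvHasDS s = false := by
      rw [← Bool.not_eq_true, pvHasDS_iff_infix]
      exact (PySem.Chars.isIn_eq_false_iff _ _).mp (by simpa using h)
    exact (pvCol_of_noDS s hds false (by simp)).symm
  termination_by s.length
  decreasing_by
    rename_i h
    rw [pvReplaceSlash_eq_rep2]
    exact pvRep2_shrink s ((pvHasDS_iff_infix s).mpr ((PySem.Chars.isIn_iff_infix _ _).mp h))

theorem pvCol_false_ne_nil (c : Char) (t : List Char) : pvCol false (c :: t) ≠ [] := by
  by_cases hc : c = '/' <;> simp [pvCol, hc]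

theorem pvCol_true_nil_iff (t : List Char) : pvCol true t = [] ↔ t.all (· == '/') := by
  induction t with
  | nil => simp [pvCol]
  | cons c t ih =>
    by_cases hc : c = '/'
    · subst hc; simpa [pvCol] using ih
    · simp [pvCol, hc]

theorem pvGetLast?_cons_ne_nil {c : Char} {l : List Char} (h : l ≠ []) :
    (c :: l).getLast? = l.getLast? := by
  cases l with
  | nil => exact absurd rfl h
  | cons d t => simp [List.getLast?_cons]

theorem pvAllSlash_getLast? (t : List Char) (h : t.all (· == '/')) :
    ('/' :: t).getLast? = some '/' := by
  induction t with
  | nil => simp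
  | cons c t ih =>
    simp at h
    obtain ⟨rfl, h2⟩ := h
    rw [List.getLast?_cons_cons]
    exact ih (by simpa using h2)

theorem pvCol_getLast? (t : List Char) :
    ∀ f, (pvCol f t).getLast? = if f && t.all (· == '/') then none else t.getLast? := by
  induction t with
  | nil => intro f; simp [pvCol]
  | cons c t ih =>
    intro f
    by_cases hc : c = '/'
    · subst hc
      cases f with
      | false =>
        simp only [pvCol, Bool.false_and, if_false, beq_self_eq_true, if_true,
          Bool.false_eq_true]
        by_cases hnil : pvCol true t = []
        · rw [hnil]
          have hall := (pvCol_true_nil_iff t).mp hnil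
          simp [pvAllSlash_getLast? t hall]
        · rw [pvGetLast?_cons_ne_nil hnil, ih true]
          have hall : t.all (· == '/') = false := by
            rw [← Bool.not_eq_true]; intro hall
            exact hnil ((pvCol_true_nil_iff t).mpr hall)
          have htne : t ≠ [] := by
            intro h; subst h; simp at hall
          simp [hall, pvGetLast?_cons_ne_nil htne]
      | true =>
        simp only [pvCol, beq_self_eq_true, if_true]
        rw [ih true]
        by_cases hall : t.all (· == '/')
        · simp [hall]
        · have htne : t ≠ [] := by
            intro h; subst h; simp at hall
          simp [hall, pvGetLast?_cons_ne_nil htne]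
    · have hall : (c :: t).all (· == '/') = false := by simp [hc]
      simp only [pvCol, beq_iff_eq, hc, if_false, hall, Bool.and_false, if_false]
      by_cases htne : t = []
      · subst htne; simp [pvCol]
      · rw [pvGetLast?_cons_ne_nil (by cases t with | nil => exact absurd rfl htne | cons d t' => exact pvCol_false_ne_nil d t'), ih false,
          pvGetLast?_cons_ne_nil htne]
        simp

theorem pvCol_append_slash (t : List Char) :
    ∀ f, t.getLast? ≠ some '/' → pvCol f (t ++ ['/']) = if f && t.isEmpty then [] else pvCol f t ++ ['/'] := by
  induction t with
  | nil => intro f _; cases f <;> simp [pvCol]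
  | cons c t ih =>
    intro f h
    by_cases hc : c = '/'
    · subst hc
      have htne : t ≠ [] := by
        intro hn; subst hn; simp at h
      have hlast : t.getLast? ≠ some '/' := by
        rwa [pvGetLast?_cons_ne_nil htne] at h
      have := ih true hlast
      rw [List.isEmpty_eq_false_iff.mpr htne] at this
      simp only [Bool.and_false, if_false, Bool.false_eq_true] at this
      cases f <;> simp [pvCol, this]
    · have hrec : t.getLast? ≠ some '/' := by
        by_cases htne : t = []
        · subst htne; simp
        · rwa [pvGetLast?_cons_ne_nil htne] at h
      have := ih false hrec
      simp only [Bool.false_and, if_false, Bool.false_eq_true] at this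
      cases f <;> simp [pvCol, hc, this]

theorem pvFoldl_eq_col (s : List Char) :
    ∀ out : List Char,
      s.foldl (fun out ch => if ch == '/' && !out.isEmpty && out.getLast? == some '/' then out
                             else out ++ [ch]) out
        = out ++ pvCol (out.getLast? == some '/') s := by
  induction s with
  | nil => intro out; simp [pvCol]
  | cons c t ih =>
    intro out
    by_cases hc : c = '/'
    · subst hc
      by_cases hl : out.getLast? = some '/'
      · have hne : out.isEmpty = false := by
          cases out with
          | nil => simp at hl
          | cons _ _ => simp
        simp only [List.foldl_cons, beq_self_eq_true, hl, hne, Bool.not_false, Bool.and_true,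
          if_true, beq_self_eq_true]
        rw [ih out, hl]
        simp [pvCol]
      · have hcond : (('/' : Char) == '/' && !out.isEmpty && out.getLast? == some '/') = false := by
          simp [hl]
        simp only [List.foldl_cons, hcond, if_false, Bool.false_eq_true]
        rw [ih (out ++ ['/'])]
        have : (out ++ ['/']).getLast? = some '/' := by simp
        rw [this]
        have hfl : (out.getLast? == some '/') = false := by simpa using hl
        simp [pvCol, hfl]
    · have hcond : ((c : Char) == '/' && !out.isEmpty && out.getLast? == some '/') = false := by
        simp [hc]
      simp only [List.foldl_cons, hcond, if_false, Bool.false_eq_true]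
      rw [ih (out ++ [c])]
      have : (out ++ [c]).getLast? = some c := by simp
      rw [this]
      have : ((some c : Option Char) == some '/') = false := by simp [hc]
      simp [pvCol, this, hc]

theorem pvEndswith_iff (v : List Char) :
    PySem.Chars.endswith v ['/'] = true ↔ v.getLast? = some '/' := by
  rw [PySem.Chars.endswith_iff]
  constructor
  · rintro ⟨l, rfl⟩; simp
  · intro h
    obtain ⟨l, rfl⟩ := List.getLast?_eq_some_iff.mp h
    exact ⟨l, rfl⟩

theorem pvMain (v : List Char) :
    pvNpLoop (if PySem.Chars.endswith v ['/'] then v else v ++ ['/'])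
      = (let out := v.foldl (fun out ch => if ch == '/' && !out.isEmpty && out.getLast? == some '/' then out
                                           else out ++ [ch]) [];
         if out.getLast? == some '/' then out else out ++ ['/']) := by
  have hfold := pvFoldl_eq_col v []
  simp only [List.getLast?_nil, List.nil_append,
    show ((none : Option Char) == some '/') = false from rfl] at hfold
  have hlast := pvCol_getLast? v false
  simp only [Bool.false_and, Bool.false_eq_true, if_false] at hlast
  simp only [hfold, pvNpLoop_eq_col]
  by_cases he : PySem.Chars.endswith v ['/'] = true
  · have hv : v.getLast? = some '/' := (pvEndswith_iff v).mp he
    simp [he, hlast, hv]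
  · have hv : v.getLast? ≠ some '/' := fun h => he ((pvEndswith_iff v).mpr h)
    have happ := pvCol_append_slash v false hv
    simp only [Bool.false_and, Bool.false_eq_true, if_false] at happ
    simp [he, happ, hlast, hv]

-- ===== VERDICT (by name: the statement is the Claim_ definition above) =====
theorem normalize_prefix_spec : Claim_equal_normalize_prefix := by
  intro raw _
  unfold Spec_normalize_prefix normalize_prefix normalize_prefix_alt
  by_cases h : (PySem.Chars.strip raw.toList).isEmpty
  · simp [h]
  · simp only [h, if_false, Bool.false_eq_true]
    exact congrArg String.ofList (pvMain _)
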